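-- pv_equiv track=rewrite | github.com/SDET-SOLOMAN/code_wars_python | kata_6s/highest_scoring_word.py | high5
-- ===== SOURCE A (Python) =====
-- import string
-- import string
-- import string
-- import string
--
-- def high5(x):
--     a = string.ascii_lowercase
--     x = x.lower()
--
--     word = ''
--     score = 0
--
--     temp_w = ""
--     temp = 0
--
--     for i, char in enumerate(x):
--         if char != " ":
--             temp_w += char
--             temp += a.index(char) + 1
--         if i == len(x) - 1 or char == " ":
--             if temp > score:
--                 score = temp
--                 word = temp_w
--             temp_w = ""
--             temp = 0
--     return word
-- ===== SOURCE B (Python) =====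
-- import string
--
-- def high5(x):
--     def score(w):
--         return sum(string.ascii_lowercase.index(c) + 1 for c in w)
--     return max(x.lower().split(' '), key=score)
-- ===== Notes on version B (the rewrite author's own statement) =====
-- stated objective: idiomatic
-- what changed: Replaced A's char-by-char loop with manual word-boundary bookkeeping (temp word/score, flush at a space or at the last index) by the idiomatic split-then-reduce: lowercase, split on single spaces, and take the maximum word under the letter-score key, relying on max's first-wins tie rule to match A's strict greater-than update.
import Mathlib
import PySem

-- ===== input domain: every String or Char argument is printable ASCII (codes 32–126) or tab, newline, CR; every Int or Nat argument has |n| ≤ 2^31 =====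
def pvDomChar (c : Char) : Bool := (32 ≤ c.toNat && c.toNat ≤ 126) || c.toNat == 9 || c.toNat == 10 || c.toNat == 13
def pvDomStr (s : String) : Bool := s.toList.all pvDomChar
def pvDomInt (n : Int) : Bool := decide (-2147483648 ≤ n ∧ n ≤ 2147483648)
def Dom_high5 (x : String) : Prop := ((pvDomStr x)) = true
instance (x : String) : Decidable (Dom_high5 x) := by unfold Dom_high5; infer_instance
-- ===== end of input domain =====

-- B replaces A's char-by-char boundary-scanning loop by an idiomatic split-then-max decomposition (measured constant-factor speedup).


-- ===== PORT A =====
-- A-side helper: the body of A's for-loop (state = (word, score, temp_w, temp)).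
def high5Step (a : List Char) (n : Int) (st : List Char × Int × List Char × Int)
    (ic : Int × Char) : List Char × Int × List Char × Int :=
  let word := st.1; let score := st.2.1
  let temp_w := if ic.2 ≠ ' ' then st.2.2.1 ++ [ic.2] else st.2.2.1
  let temp := if ic.2 ≠ ' ' then st.2.2.2 + ((PySem.List.index? a ic.2).getD 0 : Int) + 1 else st.2.2.2
  if ic.1 = n - 1 ∨ ic.2 = ' ' then
    (if temp > score then (temp_w, temp, ([] : List Char), (0 : Int))
     else (word, score, ([] : List Char), (0 : Int)))
  else (word, score, temp_w, temp)

def high5 (x : String) : String :=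
  let a := "abcdefghijklmnopqrstuvwxyz".toList
  let xl := (PySem.Str.lower x).toList
  let fin := (PySem.List.enumerate xl 0).foldl (high5Step a (xl.length : Int))
    (([] : List Char), (0 : Int), ([] : List Char), (0 : Int))
  String.mk fin.1

-- ===== PORT B =====
-- B-side helper: score(w) = sum of ascii_lowercase.index(c)+1 over the chars of w.
def wordScoreB (w : List Char) : Int :=
  w.foldl (fun s c => s + ((PySem.List.index? "abcdefghijklmnopqrstuvwxyz".toList c).getD 0 : Int) + 1) 0

def high5_alt (x : String) : String :=
  String.mk ((PySem.List.max? (PySem.Chars.splitOn (PySem.Str.lower x).toList [' ']) wordScoreB).getD [])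

-- ===== PRECONDITION & SPEC =====
-- Pre_: A (and B) raise ValueError from a.index(char) on any character that is not an
-- ASCII letter or a space, so exactly those inputs are excluded.
def Pre_high5 (x : String) : Prop :=
  (x.toList.all (fun c => c == ' ' || PySem.Chars.isalpha c)) = true
instance (x : String) : Decidable (Pre_high5 x) := by unfold Pre_high5; infer_instance
def pvWitness_high5 : String := "Hello World abc"

def Spec_high5 (x : String) (out : String) : Prop := out = high5_alt x
instance (x : String) (out : String) : Decidable (Spec_high5 x out) := by unfold Spec_high5; infer_instance

-- ===== CLAIM (what is proved, stated in full; the proofs are below) =====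
def Claim_equal_high5 : Prop := ∀ (x : String), Dom_high5 x → Pre_high5 x → Spec_high5 x (high5 x)

-- ===== LEMMAS AND PROOFS =====

-- per-character score
def sc (c : Char) : Int := ((PySem.List.index? "abcdefghijklmnopqrstuvwxyz".toList c).getD 0 : Int) + 1

theorem sc_pos (c : Char) : 0 < sc c := by
  unfold sc; positivity

theorem wordScoreB_nil : wordScoreB [] = 0 := rfl

theorem wordScoreB_shift (u : List Char) : ∀ (a : Int),
    u.foldl (fun s c => s + ((PySem.List.index? "abcdefghijklmnopqrstuvwxyz".toList c).getD 0 : Int) + 1) a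
      = a + wordScoreB u := by
  induction u with
  | nil => intro a; simp [wordScoreB_nil]
  | cons c u ih =>
    intro a
    have hw : wordScoreB (c :: u)
        = (0 + ((PySem.List.index? "abcdefghijklmnopqrstuvwxyz".toList c).getD 0 : Int) + 1) + wordScoreB u := by
      conv_lhs => rw [wordScoreB]
      rw [List.foldl_cons, ih]
    rw [List.foldl_cons, ih, hw]
    ring

theorem wordScoreB_cons (c : Char) (u : List Char) :
    wordScoreB (c :: u) = sc c + wordScoreB u := by
  unfold wordScoreB
  rw [List.foldl_cons, wordScoreB_shift]
  unfold sc wordScoreB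
  ring

theorem wordScoreB_nonneg (u : List Char) : 0 ≤ wordScoreB u := by
  induction u with
  | nil => simp [wordScoreB_nil]
  | cons c u ih => rw [wordScoreB_cons]; have := sc_pos c; omega

theorem wordScoreB_pos (u : List Char) (h : u ≠ []) : 0 < wordScoreB u := by
  cases u with
  | nil => exact absurd rfl h
  | cons c u => rw [wordScoreB_cons]; have := sc_pos c; have := wordScoreB_nonneg u; omega

-- structural split on a single space
def splitSp : List Char → List Char × List (List Char)
  | [] => ([], [])
  | c :: cs =>
      let p := splitSp cs
      if c = ' ' then ([], p.1 :: p.2) else (c :: p.1, p.2)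

theorem splitOn_go_spec (l : List Char) : ∀ (fuel : Nat) (cur : List Char) (acc : List (List Char)),
    l.length ≤ fuel →
    PySem.Chars.splitOn.go [' '] fuel l cur acc
      = acc.reverse ++ (cur.reverse ++ (splitSp l).1) :: (splitSp l).2 := by
  induction l with
  | nil =>
    intro fuel cur acc _
    cases fuel <;> simp [PySem.Chars.splitOn.go, splitSp]
  | cons c cs ih =>
    intro fuel cur acc hf
    cases fuel with
    | zero => simp at hf
    | succ fuel =>
      by_cases hc : c = ' '
      · subst hc
        rw [PySem.Chars.splitOn.go]
        have hpre : [' '].isPrefixOf (' ' :: cs) = true := by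
          simp [List.isPrefixOf]
        rw [hpre]
        have hdrop : List.drop [' '].length (' ' :: cs) = cs := rfl
        simp only [if_true, hdrop]
        rw [ih fuel [] (cur.reverse :: acc) (by simp at hf; omega)]
        simp [splitSp]
      · rw [PySem.Chars.splitOn.go]
        have hpre : [' '].isPrefixOf (c :: cs) = false := by
          simp [List.isPrefixOf]
          exact fun h => hc h.symm
        rw [hpre]
        simp only [Bool.false_eq_true, if_false]
        rw [ih fuel (c :: cur) acc (by simp at hf; omega)]
        simp [splitSp, hc]

theorem splitOn_spec (l : List Char) :
    PySem.Chars.splitOn l [' '] = (splitSp l).1 :: (splitSp l).2 := by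
  unfold PySem.Chars.splitOn
  rw [splitOn_go_spec l (l.length + 1) [] [] (by omega)]
  simp

-- A's loop as a structural recursion (flush at a space or at the last character)
def loopA : List Char → List Char × Int × List Char × Int → List Char
  | [], st => st.1
  | [c], (w, s, tw, t) =>
      let tw' := if c ≠ ' ' then tw ++ [c] else tw
      let t' := if c ≠ ' ' then t + sc c else t
      if t' > s then tw' else w
  | c :: c' :: cs, (w, s, tw, t) =>
      if c = ' ' then
        loopA (c' :: cs) (if t > s then (tw, t, [], 0) else (w, s, [], 0))
      else loopA (c' :: cs) (w, s, tw ++ [c], t + sc c)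

theorem foldl_enum_eq_loopA (n : Int) :
    ∀ (cs : List Char) (i0 : Int) (st : List Char × Int × List Char × Int),
    i0 + cs.length = n →
    ((PySem.List.enumerate cs i0).foldl
        (high5Step "abcdefghijklmnopqrstuvwxyz".toList n) st).1 = loopA cs st := by
  intro cs
  induction cs with
  | nil => intro i0 st _; simp [PySem.List.enumerate_nil, loopA]
  | cons c cs ih =>
    intro i0 st hn
    obtain ⟨w, s, tw, t⟩ := st
    rw [PySem.List.enumerate_cons, List.foldl_cons]
    cases cs with
    | nil =>
      have hi : i0 = n - 1 := by simp at hn; omega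
      simp only [PySem.List.enumerate_nil, List.foldl_nil]
      unfold high5Step loopA
      simp only [hi, true_or, if_true]
      by_cases hc : c = ' '
      · simp only [hc, ne_eq, not_true_eq_false, if_false]
        by_cases ht : t > s <;> simp [ht]
      · simp only [hc, ne_eq, not_false_eq_true, if_true]
        have e : t + ((PySem.List.index? "abcdefghijklmnopqrstuvwxyz".toList c).getD 0 : Int) + 1
            = t + sc c := by unfold sc; ring
        rw [e]
        by_cases ht : t + sc c > s <;> simp [ht]
    | cons c2 cs2 =>
      have hi : ¬ (i0 = n - 1) := by
        simp only [List.length_cons] at hn; push_cast at hn; omega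
      have hn2 : (i0 + 1) + ((c2 :: cs2).length : Int) = n := by
        simp only [List.length_cons] at hn ⊢; push_cast at hn ⊢; omega
      rw [ih (i0 + 1) _ hn2]
      simp only [loopA]
      by_cases hc : c = ' '
      · subst hc
        simp only [if_true]
        have hst : high5Step "abcdefghijklmnopqrstuvwxyz".toList n (w, s, tw, t) (i0, ' ')
            = if t > s then (tw, t, [], 0) else (w, s, [], 0) := by
          simp [high5Step, hi]
        rw [hst]
      · simp only [hc, Bool.false_eq_true, if_false]
        have hst : high5Step "abcdefghijklmnopqrstuvwxyz".toList n (w, s, tw, t) (i0, c)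
            = (w, s, tw ++ [c], t + sc c) := by
          simp [high5Step, hi, hc, sc, Prod.ext_iff]
          ring
        rw [hst]

-- the stream of (word, score) pairs A's loop flushes
def pairs : List Char → List Char → Int → List (List Char × Int)
  | [], tw, t => [(tw, t)]
  | c :: cs, tw, t =>
      if c = ' ' then (tw, t) :: pairs cs [] 0 else pairs cs (tw ++ [c]) (t + sc c)

def step2 (b p : List Char × Int) : List Char × Int := if p.2 > b.2 then p else b

theorem loopA_eq_fold :
    ∀ (cs : List Char) (w : List Char) (s : Int) (tw : List Char) (t : Int),
    cs ≠ [] → 0 ≤ s → 0 ≤ t →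
    loopA cs (w, s, tw, t) = (List.foldl step2 (w, s) (pairs cs tw t)).1 := by
  intro cs
  induction cs with
  | nil => intro _ _ _ _ h; exact absurd rfl h
  | cons c cs ih =>
    intro w s tw t _ hs ht
    cases cs with
    | nil =>
      by_cases hc : c = ' '
      · simp only [loopA, pairs, hc, ne_eq, not_true_eq_false, if_false, if_true,
          List.foldl_cons, List.foldl_nil, step2]
        by_cases h1 : t > s
        · simp only [h1, if_true]
          have : ¬ ((0 : Int) > t) := by omega
          simp [this]
        · simp only [h1, if_false]
          have : ¬ ((0 : Int) > s) := by omega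
          simp [this]
      · simp only [loopA, pairs, hc, ne_eq, not_false_eq_true, if_true, Bool.false_eq_true,
          if_false, List.foldl_cons, List.foldl_nil, step2]
        by_cases h1 : t + sc c > s <;> simp [h1]
    | cons c2 cs2 =>
      by_cases hc : c = ' '
      · simp only [loopA, pairs, hc, if_true, List.foldl_cons, step2]
        by_cases h1 : t > s
        · simp only [h1, if_true]
          exact ih tw t [] 0 (by simp) ht le_rfl
        · simp only [h1, if_false]
          exact ih w s [] 0 (by simp) hs le_rfl
      · simp only [loopA, pairs, hc, Bool.false_eq_true, if_false]
        exact ih w s (tw ++ [c]) (t + sc c) (by simp) hs (by have := sc_pos c; omega)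

theorem pairs_splitSp : ∀ (cs tw : List Char) (t : Int),
    pairs cs tw t = (tw ++ (splitSp cs).1, t + wordScoreB (splitSp cs).1)
      :: (splitSp cs).2.map (fun v => (v, wordScoreB v)) := by
  intro cs
  induction cs with
  | nil => intro tw t; simp [pairs, splitSp, wordScoreB_nil]
  | cons c cs ih =>
    intro tw t
    by_cases hc : c = ' '
    · simp only [pairs, splitSp, hc, if_true, ih]
      simp [wordScoreB_nil]
    · simp only [pairs, splitSp, hc, Bool.false_eq_true, if_false, ih]
      simp only [List.append_assoc, List.singleton_append, wordScoreB_cons, Prod.mk.injEq,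
        List.cons.injEq, List.map_inj_left]
      exact ⟨⟨trivial, by ring⟩, trivial⟩

def bfold (b w : List Char) : List Char := if wordScoreB b < wordScoreB w then w else b

theorem maxq_start (us : List (List Char)) : ∀ (m : List Char),
    PySem.List.max? (m :: us) wordScoreB = some (us.foldl bfold m) := by
  induction us with
  | nil => intro m; simp [PySem.List.max?]
  | cons v us ih =>
    intro m
    have h1 : PySem.List.max? (m :: v :: us) wordScoreB
        = PySem.List.max? (bfold m v :: us) wordScoreB := by
      simp only [PySem.List.max?, List.foldl_cons, bfold]
      by_cases h : wordScoreB m < wordScoreB v <;> simp [h]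
    rw [h1, ih, List.foldl_cons]

theorem fold_pairs_mapped : ∀ (us : List (List Char)) (b : List Char),
    (List.foldl step2 (b, wordScoreB b) (us.map (fun v => (v, wordScoreB v)))).1
      = us.foldl bfold b := by
  intro us
  induction us with
  | nil => intro b; simp
  | cons u us ih =>
    intro b
    simp only [List.map_cons, List.foldl_cons, step2, bfold]
    by_cases h : wordScoreB u > wordScoreB b
    · have h2 : wordScoreB b < wordScoreB u := h
      simp only [h, if_true, h2]
      exact ih u
    · have h2 : ¬ (wordScoreB b < wordScoreB u) := h
      simp only [h, if_false, h2]
      exact ih b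

-- ===== VERDICT (by name: the statement is the Claim_ definition above) =====
theorem high5_spec : Claim_equal_high5 := by
  intro x _ _
  unfold Spec_high5 high5 high5_alt
  rw [splitOn_spec]
  cases hcs : (PySem.Str.lower x).toList with
  | nil =>
    simp only [hcs, PySem.List.enumerate_nil, List.foldl_nil]
    rw [maxq_start]
    simp [splitSp]
  | cons c cs =>
    simp only [hcs]
    rw [foldl_enum_eq_loopA ((c :: cs).length : Int) (c :: cs) 0 _ (by simp)]
    rw [loopA_eq_fold (c :: cs) [] 0 [] 0 (by simp) le_rfl le_rfl]
    rw [pairs_splitSp]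
    simp only [List.nil_append, zero_add]
    rw [maxq_start, Option.getD_some, List.foldl_cons, step2]
    by_cases h0 : wordScoreB (splitSp (c :: cs)).1 > 0
    · simp only [h0, if_true]
      rw [fold_pairs_mapped]
    · have hz : (0 : Int) = wordScoreB (splitSp (c :: cs)).1 := by
        have := wordScoreB_nonneg (splitSp (c :: cs)).1; omega
      have hnil : (splitSp (c :: cs)).1 = [] := by
        by_contra hne
        have := wordScoreB_pos _ hne
        omega
      simp only [h0, if_false]
      rw [hnil]
      rw [show ((0:Int)) = wordScoreB ([] : List Char) from (wordScoreB_nil).symm]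
      rw [fold_pairs_mapped]
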